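-- pv_equiv track=rewrite | github.com/orenlab/codeclone | codeclone/cli.py | _report_path_origins
-- ===== SOURCE A (Python) =====
-- from collections.abc import Mapping, Sequence
-- from typing import TYPE_CHECKING, Literal, Protocol, cast
--
-- ReportPathOrigin = Literal["default", "explicit"]
--
-- def _report_path_origins(argv: Sequence[str]) -> dict[str, ReportPathOrigin | None]:
--     origins: dict[str, ReportPathOrigin | None] = {
--         "html": None,
--         "json": None,
--         "md": None,
--         "sarif": None,
--         "text": None,
--     }
--     flag_to_field = {
--         "--html": "html",
--         "--json": "json",
--         "--md": "md",
--         "--sarif": "sarif",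
--         "--text": "text",
--     }
--     index = 0
--     while index < len(argv):
--         token = argv[index]
--         if token == "--":
--             break
--         if "=" in token:
--             flag, _value = token.split("=", maxsplit=1)
--             field_name = flag_to_field.get(flag)
--             if field_name is not None:
--                 origins[field_name] = "explicit"
--             index += 1
--             continue
--         field_name = flag_to_field.get(token)
--         if field_name is None:
--             index += 1
--             continue
--         next_token = argv[index + 1] if index + 1 < len(argv) else None
--         if next_token is None or next_token.startswith("-"):
--             origins[field_name] = "default"
--             index += 1
--             continue
--         origins[field_name] = "explicit"
--         index += 2
--     return origins
-- ===== SOURCE B (Python) =====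
-- def _before_double_dash(argv):
--     tokens = []
--     for token in argv:
--         if token == "--":
--             break
--         tokens.append(token)
--     return tokens
--
--
-- def _origin(tokens, flag):
--     result = None
--     for i, tok in enumerate(tokens):
--         if tok.startswith(flag + "="):
--             result = "explicit"
--         elif tok == flag:
--             nxt = tokens[i + 1] if i + 1 < len(tokens) else None
--             result = "default" if nxt is None or nxt.startswith("-") else "explicit"
--     return result
--
--
-- def _report_path_origins(argv):
--     tokens = _before_double_dash(argv)
--     return {
--         field: _origin(tokens, flag)
--         for flag, field in [
--             ("--html", "html"),
--             ("--json", "json"),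
--             ("--md", "md"),
--             ("--sarif", "sarif"),
--             ("--text", "text"),
--         ]
--     }
-- ===== Notes on version B (the rewrite author's own statement) =====
-- stated objective: alternative
-- what changed: Replaced A's single stateful index-walk with a variable +1/+2 stride over a mutable origins dict by a per-field decomposition: truncate argv at '--' once, then compute each field's origin independently as the last matching occurrence in a plain enumerate scan (last write wins); a consumed value token can never look like a flag, so no token skipping is needed.
import Mathlib
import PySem

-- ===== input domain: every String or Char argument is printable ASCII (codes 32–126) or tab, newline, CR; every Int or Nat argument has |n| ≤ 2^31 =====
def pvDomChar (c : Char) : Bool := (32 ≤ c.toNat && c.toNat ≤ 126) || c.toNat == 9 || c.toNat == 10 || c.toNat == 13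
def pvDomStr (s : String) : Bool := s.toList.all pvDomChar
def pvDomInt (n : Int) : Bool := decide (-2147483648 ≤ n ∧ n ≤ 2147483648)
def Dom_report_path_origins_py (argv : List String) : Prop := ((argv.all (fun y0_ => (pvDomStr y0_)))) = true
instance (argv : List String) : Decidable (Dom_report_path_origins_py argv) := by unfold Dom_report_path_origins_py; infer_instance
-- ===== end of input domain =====

-- B replaces A's single stateful +1/+2-stride walk over a mutable dict by a per-field
-- decomposition (truncate at '--' once, then one independent last-match scan per flag);
-- same cost class, different algorithm.

-- ===== PORT A =====
-- token.split("=", maxsplit=1)[0]; the .getD/.headD defaults are never reached: the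
-- split is only used when '=' occurs in token, where it returns exactly two pieces.
def pvFirst (t : String) : String := ((PySem.Str.splitMax? t "=" 1).getD []).headD ""

def pvFlagToField : PySem.Dict String String :=
  PySem.Dict.ofList [("--html","html"),("--json","json"),("--md","md"),("--sarif","sarif"),("--text","text")]

-- the while-loop over argv; the list argument is the remaining suffix argv[index:]
def pvLoopA (origins : PySem.Dict String (Option String)) : List String → PySem.Dict String (Option String)
  | [] => origins
  | token :: rest =>
    if token == "--" then origins
    else if PySem.Str.isIn "=" token then
      match pvFlagToField.get? (pvFirst token) with
      | some fieldName => pvLoopA (origins.insert fieldName (some "explicit")) rest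
      | none => pvLoopA origins rest
    else
      match pvFlagToField.get? token with
      | none => pvLoopA origins rest
      | some fieldName =>
        match rest with
        | [] => pvLoopA (origins.insert fieldName (some "default")) []
        | nextTok :: rest' =>
          if PySem.Str.startswith nextTok "-" then
            pvLoopA (origins.insert fieldName (some "default")) (nextTok :: rest')
          else
            pvLoopA (origins.insert fieldName (some "explicit")) rest'

def report_path_origins_py (argv : List String) : List (String × Option String) :=
  (pvLoopA (PySem.Dict.ofList
      [("html",none),("json",none),("md",none),("sarif",none),("text",none)]) argv).items

-- ===== PORT B =====
-- _before_double_dash: collect tokens until the first '--'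
def pvBeforeDD : List String → List String
  | [] => []
  | token :: rest => if token == "--" then [] else token :: pvBeforeDD rest

-- _origin's loop; `rest.head?` is tokens[i+1] (None when past the end)
def pvOriginScan (flag : String) (result : Option String) : List String → Option String
  | [] => result
  | tok :: rest =>
    pvOriginScan flag
      (if PySem.Str.startswith tok (flag ++ "=") then some "explicit"
       else if tok == flag then
         some (match rest.head? with
               | none => "default"
               | some nxt => if PySem.Str.startswith nxt "-" then "default" else "explicit")
       else result)
      rest

def pvFlagFields : List (String × String) :=
  [("--html","html"),("--json","json"),("--md","md"),("--sarif","sarif"),("--text","text")]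

def report_path_origins_py_alt (argv : List String) : List (String × Option String) :=
  let tokens := pvBeforeDD argv
  pvFlagFields.map (fun p => (p.2, pvOriginScan p.1 none tokens))

-- ===== PRECONDITION & SPEC =====
def Spec_report_path_origins_py (argv : List String) (out : List (String × Option String)) : Prop := out = report_path_origins_py_alt argv
instance (argv : List String) (out : List (String × Option String)) : Decidable (Spec_report_path_origins_py argv out) := by unfold Spec_report_path_origins_py; infer_instance

-- ===== CLAIM (what is proved, stated in full; the proofs are below) =====
def Claim_equal_report_path_origins_py : Prop := ∀ (argv : List String), Dom_report_path_origins_py argv → Spec_report_path_origins_py argv (report_path_origins_py argv)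

-- ===== LEMMAS AND PROOFS =====

-- the five origins values as a dict shape
def pvD5 (vh vj vm vs vt : Option String) : PySem.Dict String (Option String) :=
  PySem.Dict.mk [("html",vh),("json",vj),("md",vm),("sarif",vs),("text",vt)]

lemma pv_str_eq_of_toList {s t : String} (h : s.toList = t.toList) : s = t := by
  have := congrArg String.ofList h; simpa using this

lemma pv_singleton_infix {c : Char} {s : List Char} : ([c] <:+: s) ↔ c ∈ s := by
  constructor
  · intro h; exact h.sublist.subset (List.mem_singleton_self c)
  · intro h
    obtain ⟨l₁, l₂, rfl⟩ := List.append_of_mem h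
    exact ⟨l₁, l₂, by simp⟩

lemma pv_mem_of_isIn {t : String} (h : PySem.Str.isIn "=" t = true) : '=' ∈ t.toList := by
  exact pv_singleton_infix.mp ((PySem.Str.isIn_iff_infix "=" t).mp h)

lemma pv_not_mem_of_not_isIn {t : String} (h : PySem.Str.isIn "=" t = false) : '=' ∉ t.toList := by
  intro hmem
  have h3 : PySem.Str.isIn "=" t = true :=
    (PySem.Str.isIn_iff_infix "=" t).mpr (pv_singleton_infix.mpr hmem)
  rw [h] at h3
  exact Bool.noConfusion h3

-- p ++ [c] is a prefix of s  iff  c occurs in s and everything before its first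
-- occurrence is exactly p
lemma pv_marker_prefix_iff (p : List Char) (c : Char) (hp : c ∉ p) :
    ∀ s : List Char, ((p ++ [c]) <+: s) ↔ (c ∈ s ∧ s.takeWhile (fun x => x ≠ c) = p) := by
  induction p with
  | nil =>
    intro s
    cases s with
    | nil => simp
    | cons a s' =>
      constructor
      · intro h
        have hca : c = a := by simpa using h
        subst hca
        exact ⟨by simp, by rw [List.takeWhile_cons_of_neg (by simp)]⟩
      · rintro ⟨h1, h2⟩
        by_cases hac : a = c
        · subst hac
          simpa using List.cons_prefix_cons.mpr ⟨rfl, List.nil_prefix⟩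
        · exfalso
          rw [List.takeWhile_cons_of_pos (by simp [hac])] at h2
          simp at h2
  | cons b p' ih =>
    intro s
    have hcb : c ≠ b := fun h => hp (by simp [h])
    have hp' : c ∉ p' := fun h => hp (by simp [h])
    cases s with
    | nil => simp
    | cons a s' =>
      rw [List.cons_append, List.cons_prefix_cons]
      constructor
      · rintro ⟨rfl, h⟩
        obtain ⟨h1, h2⟩ := (ih hp' s').mp h
        refine ⟨by simp [h1], ?_⟩
        rw [List.takeWhile_cons_of_pos (by simp [Ne.symm hcb])]
        rw [h2]
      · rintro ⟨h1, h2⟩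
        by_cases hac : a = c
        · exfalso
          rw [List.takeWhile_cons_of_neg (by simp [hac])] at h2
          simp at h2
        · rw [List.takeWhile_cons_of_pos (by simp [hac])] at h2
          obtain ⟨hab, htw'⟩ := List.cons.inj h2
          refine ⟨hab.symm, (ih hp' s').mpr ⟨?_, htw'⟩⟩
          rcases List.mem_cons.mp h1 with h | h
          · exact absurd h.symm hac
          · exact h

-- single-step unfoldings of split's fuel loop (maxsplit reached / separator hit / no hit)
lemma pv_go_zero (c : Char) (s cur : List Char) (acc : List (List Char)) (fuel : Nat)
    (h : 0 < fuel) :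
    PySem.Chars.splitOnMax.go [c] fuel 0 s cur acc = acc.reverse ++ [cur.reverse ++ s] := by
  cases fuel with
  | zero => omega
  | succ f =>
    cases s with
    | nil =>
      rw [show PySem.Chars.splitOnMax.go [c] (f+1) 0 [] cur acc = (cur.reverse :: acc).reverse from rfl]
      simp
    | cons a s' =>
      rw [show PySem.Chars.splitOnMax.go [c] (f+1) 0 (a :: s') cur acc
            = ((cur.reverse ++ (a :: s')) :: acc).reverse from rfl]
      simp

lemma pv_go_step_true (c a : Char) (s cur : List Char) (acc : List (List Char)) (f : Nat)
    (h : (c == a) = true) :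
    PySem.Chars.splitOnMax.go [c] (f+1) 1 (a :: s) cur acc
      = PySem.Chars.splitOnMax.go [c] f 0 s [] (cur.reverse :: acc) := by
  rw [PySem.Chars.splitOnMax.go.eq_def]
  simp [List.isPrefixOf, h]

lemma pv_go_step_false (c a : Char) (s cur : List Char) (acc : List (List Char)) (f : Nat)
    (h : (c == a) = false) :
    PySem.Chars.splitOnMax.go [c] (f+1) 1 (a :: s) cur acc
      = PySem.Chars.splitOnMax.go [c] f 1 s (a :: cur) acc := by
  rw [PySem.Chars.splitOnMax.go.eq_def]
  simp [List.isPrefixOf, h]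

lemma pv_go_one (c : Char) :
    ∀ (s cur : List Char) (acc : List (List Char)) (fuel : Nat), s.length < fuel →
    PySem.Chars.splitOnMax.go [c] fuel 1 s cur acc =
      if c ∈ s then
        acc.reverse ++ [cur.reverse ++ s.takeWhile (fun x => x ≠ c),
                        (s.dropWhile (fun x => x ≠ c)).tail]
      else acc.reverse ++ [cur.reverse ++ s] := by
  intro s
  induction s with
  | nil =>
    intro cur acc fuel h
    cases fuel with
    | zero => omega
    | succ f =>
      rw [show PySem.Chars.splitOnMax.go [c] (f+1) 1 [] cur acc = (cur.reverse :: acc).reverse from rfl]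
      simp
  | cons a s ih =>
    intro cur acc fuel h
    cases fuel with
    | zero => omega
    | succ f =>
      have hf : s.length < f := by simp at h; omega
      cases hca : (c == a) with
      | true =>
        rw [pv_go_step_true c a s cur acc f hca,
            pv_go_zero c s [] (cur.reverse :: acc) f (by omega)]
        have hac : a = c := (beq_iff_eq.mp hca).symm
        subst hac
        rw [if_pos (by simp)]
        simp [List.takeWhile_cons, List.dropWhile_cons]
      | false =>
        have hac : c ≠ a := fun h' => by rw [h'] at hca; simp at hca
        rw [pv_go_step_false c a s cur acc f hca, ih (a :: cur) acc f hf]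
        by_cases hcs : c ∈ s
        · rw [if_pos hcs, if_pos (by simp [hcs])]
          simp [List.takeWhile_cons, List.dropWhile_cons, Ne.symm hac]
        · rw [if_neg hcs, if_neg (by simp [hcs, hac])]
          simp

lemma pvFirst_toList {t : String} (h : '=' ∈ t.toList) :
    (pvFirst t).toList = t.toList.takeWhile (fun x => x ≠ '=') := by
  have h1 : PySem.Str.splitMax? t "=" 1
      = some ((PySem.Chars.splitOnMax.go ['='] (t.toList.length + 1) 1 t.toList [] []).map String.ofList) := rfl
  rw [pvFirst, h1, pv_go_one '=' t.toList [] [] (t.toList.length + 1) (by omega)]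
  simp [h]

-- pvBeforeDD unfoldings
lemma pv_bdd_dd (rest : List String) : pvBeforeDD ("--" :: rest) = [] := rfl

lemma pv_bdd_cons (t : String) (rest : List String) (ht : (t == "--") = false) :
    pvBeforeDD (t :: rest) = t :: pvBeforeDD rest := by
  rw [pvBeforeDD.eq_2, ht]
  simp

-- pvLoopA one-step unfoldings
lemma pvA_eqform_hit (d : PySem.Dict String (Option String)) (t f : String) (rest : List String)
    (ht : (t == "--") = false) (hin : PySem.Str.isIn "=" t = true)
    (hg : pvFlagToField.get? (pvFirst t) = some f) :
    pvLoopA d (t :: rest) = pvLoopA (d.insert f (some "explicit")) rest := by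
  rw [pvLoopA.eq_2, ht, hin, hg]
  simp

lemma pvA_eqform_miss (d : PySem.Dict String (Option String)) (t : String) (rest : List String)
    (ht : (t == "--") = false) (hin : PySem.Str.isIn "=" t = true)
    (hg : pvFlagToField.get? (pvFirst t) = none) :
    pvLoopA d (t :: rest) = pvLoopA d rest := by
  rw [pvLoopA.eq_2, ht, hin, hg]
  simp

lemma pvA_plain_miss (d : PySem.Dict String (Option String)) (t : String) (rest : List String)
    (ht : (t == "--") = false) (hin : PySem.Str.isIn "=" t = false)
    (hg : pvFlagToField.get? t = none) :
    pvLoopA d (t :: rest) = pvLoopA d rest := by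
  rw [pvLoopA.eq_2, ht, hin, hg]
  simp

lemma pvA_flag_dash (d : PySem.Dict String (Option String)) (t f n : String) (rest' : List String)
    (ht : (t == "--") = false) (hin : PySem.Str.isIn "=" t = false)
    (hg : pvFlagToField.get? t = some f) (hd : PySem.Str.startswith n "-" = true) :
    pvLoopA d (t :: n :: rest') = pvLoopA (d.insert f (some "default")) (n :: rest') := by
  have hd' : PySem.Chars.startswith n.toList ['-'] = true := by simpa using hd
  rw [pvLoopA.eq_2, ht, hin, hg]
  simp [hd']

lemma pvA_flag_val (d : PySem.Dict String (Option String)) (t f n : String) (rest' : List String)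
    (ht : (t == "--") = false) (hin : PySem.Str.isIn "=" t = false)
    (hg : pvFlagToField.get? t = some f) (hd : PySem.Str.startswith n "-" = false) :
    pvLoopA d (t :: n :: rest') = pvLoopA (d.insert f (some "explicit")) rest' := by
  have hd' : PySem.Chars.startswith n.toList ['-'] = false := by simpa using hd
  rw [pvLoopA.eq_2, ht, hin, hg]
  simp [hd']

lemma pv_get5 (x : String) : pvFlagToField.get? x =
    if "--html" == x then some "html" else if "--json" == x then some "json"
    else if "--md" == x then some "md" else if "--sarif" == x then some "sarif"
    else if "--text" == x then some "text" else none := by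
  show (PySem.Dict.mk [("--html","html"),("--json","json"),("--md","md"),("--sarif","sarif"),("--text","text")]).get? x = _
  simp only [PySem.Dict.get?_mk_cons]
  rfl

-- insert computations on the five-field dict
lemma pv_insH (vh vj vm vs vt w : Option String) :
    (pvD5 vh vj vm vs vt).insert "html" w = pvD5 w vj vm vs vt := rfl
lemma pv_insJ (vh vj vm vs vt w : Option String) :
    (pvD5 vh vj vm vs vt).insert "json" w = pvD5 vh w vm vs vt := rfl
lemma pv_insM (vh vj vm vs vt w : Option String) :
    (pvD5 vh vj vm vs vt).insert "md" w = pvD5 vh vj w vs vt := rfl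
lemma pv_insS (vh vj vm vs vt w : Option String) :
    (pvD5 vh vj vm vs vt).insert "sarif" w = pvD5 vh vj vm w vt := rfl
lemma pv_insT (vh vj vm vs vt w : Option String) :
    (pvD5 vh vj vm vs vt).insert "text" w = pvD5 vh vj vm vs w := rfl

-- pvOriginScan one-step facts (stated with the hypotheses in simp-normal, Chars form)
lemma pv_sw_self_marker (flag : String) :
    PySem.Chars.startswith flag.toList (flag.toList ++ ['=']) = false := by
  cases h : PySem.Chars.startswith flag.toList (flag.toList ++ ['=']) with
  | false => rfl
  | true =>
    have := ((PySem.Chars.startswith_iff _ _).mp h).length_le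
    simp at this

lemma pv_scan_eqform_hit {t flag : String} (a : Option String) (rest : List String)
    (hf : '=' ∉ flag.toList)
    (htw : t.toList.takeWhile (fun x => x ≠ '=') = flag.toList) (hmem : '=' ∈ t.toList) :
    pvOriginScan flag a (t :: rest) = pvOriginScan flag (some "explicit") rest := by
  have hsw : PySem.Chars.startswith t.toList (flag.toList ++ ['=']) = true := by
    rw [PySem.Chars.startswith_iff]
    exact (pv_marker_prefix_iff flag.toList '=' hf t.toList).mpr ⟨hmem, htw⟩
  simp [pvOriginScan, hsw]

lemma pv_scan_eqform_miss {t flag : String} (a : Option String) (rest : List String)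
    (hf : '=' ∉ flag.toList)
    (htw : t.toList.takeWhile (fun x => x ≠ '=') ≠ flag.toList) (hmem : '=' ∈ t.toList) :
    pvOriginScan flag a (t :: rest) = pvOriginScan flag a rest := by
  have hsw : PySem.Chars.startswith t.toList (flag.toList ++ ['=']) = false := by
    cases h : PySem.Chars.startswith t.toList (flag.toList ++ ['=']) with
    | false => rfl
    | true =>
      exact absurd ((pv_marker_prefix_iff flag.toList '=' hf t.toList).mp
        ((PySem.Chars.startswith_iff _ _).mp h)).2 htw
  have hne : ¬ (t = flag) := fun he => hf (he ▸ hmem)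
  simp [pvOriginScan, hsw, hne]

lemma pv_scan_plain_miss {t flag : String} (a : Option String) (rest : List String)
    (hf : '=' ∉ flag.toList) (hnin : '=' ∉ t.toList) (hne : t ≠ flag) :
    pvOriginScan flag a (t :: rest) = pvOriginScan flag a rest := by
  have hsw : PySem.Chars.startswith t.toList (flag.toList ++ ['=']) = false := by
    cases h : PySem.Chars.startswith t.toList (flag.toList ++ ['=']) with
    | false => rfl
    | true =>
      exact absurd ((pv_marker_prefix_iff flag.toList '=' hf t.toList).mp
        ((PySem.Chars.startswith_iff _ _).mp h)).1 hnin
  simp [pvOriginScan, hsw, hne]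

lemma pv_scan_dash_miss {t flag : String} (a : Option String) (rest : List String)
    (hfl : PySem.Str.startswith flag "-" = true) (hts : PySem.Str.startswith t "-" = false) :
    pvOriginScan flag a (t :: rest) = pvOriginScan flag a rest := by
  have hpre : ['-'] <+: flag.toList := by
    have h := (PySem.Chars.startswith_iff flag.toList ['-']).mp (by simpa using hfl)
    simpa using h
  have hts' : PySem.Chars.startswith t.toList ['-'] = false := by simpa using hts
  have hsw : PySem.Chars.startswith t.toList (flag.toList ++ ['=']) = false := by
    cases h : PySem.Chars.startswith t.toList (flag.toList ++ ['=']) with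
    | false => rfl
    | true =>
      have hp := (PySem.Chars.startswith_iff _ _).mp h
      have hd : ['-'] <+: t.toList := (hpre.trans (List.prefix_append _ _)).trans hp
      have := (PySem.Chars.startswith_iff t.toList ['-']).mpr hd
      rw [hts'] at this
      exact Bool.noConfusion this
  have hne : ¬ (t = flag) := by
    intro he
    have := (PySem.Chars.startswith_iff flag.toList ['-']).mpr hpre
    rw [← he, hts'] at this
    exact Bool.noConfusion this
  simp [pvOriginScan, hsw, hne]

lemma pv_scan_selfhit_cons_default (flag : String) (a : Option String) (n : String)
    (w : List String) (hd : PySem.Str.startswith n "-" = true) :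
    pvOriginScan flag a (flag :: n :: w) = pvOriginScan flag (some "default") (n :: w) := by
  have hd' : PySem.Chars.startswith n.toList ['-'] = true := by simpa using hd
  simp [pvOriginScan, pv_sw_self_marker flag, hd']

lemma pv_scan_selfhit_cons_explicit (flag : String) (a : Option String) (n : String)
    (w : List String) (hd : PySem.Str.startswith n "-" = false) :
    pvOriginScan flag a (flag :: n :: w) = pvOriginScan flag (some "explicit") (n :: w) := by
  have hd' : PySem.Chars.startswith n.toList ['-'] = false := by simpa using hd
  simp [pvOriginScan, pv_sw_self_marker flag, hd']

lemma pv_main : ∀ (N : Nat) (argv : List String), argv.length ≤ N →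
    ∀ vh vj vm vs vt : Option String,
    (pvLoopA (pvD5 vh vj vm vs vt) argv).items =
      [("html", pvOriginScan "--html" vh (pvBeforeDD argv)),
       ("json", pvOriginScan "--json" vj (pvBeforeDD argv)),
       ("md", pvOriginScan "--md" vm (pvBeforeDD argv)),
       ("sarif", pvOriginScan "--sarif" vs (pvBeforeDD argv)),
       ("text", pvOriginScan "--text" vt (pvBeforeDD argv))] := by
  intro N
  induction N with
  | zero =>
    intro argv hlen vh vj vm vs vt
    have : argv = [] := List.length_eq_zero_iff.mp (Nat.le_zero.mp hlen)
    subst this; rfl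
  | succ N ih =>
    intro argv hlen vh vj vm vs vt
    cases argv with
    | nil => rfl
    | cons t rest =>
      by_cases hdd : t = "--"
      · subst hdd; rfl
      have ht : (t == "--") = false := beq_eq_false_iff_ne.mpr hdd
      have hrl : rest.length ≤ N := by have h := hlen; simp at h; omega
      rw [pv_bdd_cons t rest ht]
      cases hin : PySem.Str.isIn "=" t with
      | true =>
        have hmem : '=' ∈ t.toList := pv_mem_of_isIn hin
        have htw : (pvFirst t).toList = t.toList.takeWhile (fun x => x ≠ '=') := pvFirst_toList hmem
        by_cases hq1 : "--html" = pvFirst t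
        · -- html
          have hfv : pvFirst t = "--html" := hq1.symm
          have hg : pvFlagToField.get? (pvFirst t) = some "html" := by rw [hfv]; rfl
          have htwF : t.toList.takeWhile (fun x => x ≠ '=') = ("--html").toList := by rw [← htw, hfv]
          rw [pvA_eqform_hit _ t "html" rest ht hin hg, pv_insH, ih rest hrl]
          rw [pv_scan_eqform_hit (t := t) (flag := "--html") vh (pvBeforeDD rest) (by decide) htwF hmem,
              pv_scan_eqform_miss (t := t) (flag := "--json") vj (pvBeforeDD rest) (by decide) (by rw [htwF]; decide) hmem,
              pv_scan_eqform_miss (t := t) (flag := "--md") vm (pvBeforeDD rest) (by decide) (by rw [htwF]; decide) hmem,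
              pv_scan_eqform_miss (t := t) (flag := "--sarif") vs (pvBeforeDD rest) (by decide) (by rw [htwF]; decide) hmem,
              pv_scan_eqform_miss (t := t) (flag := "--text") vt (pvBeforeDD rest) (by decide) (by rw [htwF]; decide) hmem]
        by_cases hq2 : "--json" = pvFirst t
        · -- json
          have hfv : pvFirst t = "--json" := hq2.symm
          have hg : pvFlagToField.get? (pvFirst t) = some "json" := by rw [hfv]; rfl
          have htwF : t.toList.takeWhile (fun x => x ≠ '=') = ("--json").toList := by rw [← htw, hfv]
          rw [pvA_eqform_hit _ t "json" rest ht hin hg, pv_insJ, ih rest hrl]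
          rw [pv_scan_eqform_miss (t := t) (flag := "--html") vh (pvBeforeDD rest) (by decide) (by rw [htwF]; decide) hmem,
              pv_scan_eqform_hit (t := t) (flag := "--json") vj (pvBeforeDD rest) (by decide) htwF hmem,
              pv_scan_eqform_miss (t := t) (flag := "--md") vm (pvBeforeDD rest) (by decide) (by rw [htwF]; decide) hmem,
              pv_scan_eqform_miss (t := t) (flag := "--sarif") vs (pvBeforeDD rest) (by decide) (by rw [htwF]; decide) hmem,
              pv_scan_eqform_miss (t := t) (flag := "--text") vt (pvBeforeDD rest) (by decide) (by rw [htwF]; decide) hmem]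
        by_cases hq3 : "--md" = pvFirst t
        · -- md
          have hfv : pvFirst t = "--md" := hq3.symm
          have hg : pvFlagToField.get? (pvFirst t) = some "md" := by rw [hfv]; rfl
          have htwF : t.toList.takeWhile (fun x => x ≠ '=') = ("--md").toList := by rw [← htw, hfv]
          rw [pvA_eqform_hit _ t "md" rest ht hin hg, pv_insM, ih rest hrl]
          rw [pv_scan_eqform_miss (t := t) (flag := "--html") vh (pvBeforeDD rest) (by decide) (by rw [htwF]; decide) hmem,
              pv_scan_eqform_miss (t := t) (flag := "--json") vj (pvBeforeDD rest) (by decide) (by rw [htwF]; decide) hmem,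
              pv_scan_eqform_hit (t := t) (flag := "--md") vm (pvBeforeDD rest) (by decide) htwF hmem,
              pv_scan_eqform_miss (t := t) (flag := "--sarif") vs (pvBeforeDD rest) (by decide) (by rw [htwF]; decide) hmem,
              pv_scan_eqform_miss (t := t) (flag := "--text") vt (pvBeforeDD rest) (by decide) (by rw [htwF]; decide) hmem]
        by_cases hq4 : "--sarif" = pvFirst t
        · -- sarif
          have hfv : pvFirst t = "--sarif" := hq4.symm
          have hg : pvFlagToField.get? (pvFirst t) = some "sarif" := by rw [hfv]; rfl
          have htwF : t.toList.takeWhile (fun x => x ≠ '=') = ("--sarif").toList := by rw [← htw, hfv]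
          rw [pvA_eqform_hit _ t "sarif" rest ht hin hg, pv_insS, ih rest hrl]
          rw [pv_scan_eqform_miss (t := t) (flag := "--html") vh (pvBeforeDD rest) (by decide) (by rw [htwF]; decide) hmem,
              pv_scan_eqform_miss (t := t) (flag := "--json") vj (pvBeforeDD rest) (by decide) (by rw [htwF]; decide) hmem,
              pv_scan_eqform_miss (t := t) (flag := "--md") vm (pvBeforeDD rest) (by decide) (by rw [htwF]; decide) hmem,
              pv_scan_eqform_hit (t := t) (flag := "--sarif") vs (pvBeforeDD rest) (by decide) htwF hmem,
              pv_scan_eqform_miss (t := t) (flag := "--text") vt (pvBeforeDD rest) (by decide) (by rw [htwF]; decide) hmem]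
        by_cases hq5 : "--text" = pvFirst t
        · -- text
          have hfv : pvFirst t = "--text" := hq5.symm
          have hg : pvFlagToField.get? (pvFirst t) = some "text" := by rw [hfv]; rfl
          have htwF : t.toList.takeWhile (fun x => x ≠ '=') = ("--text").toList := by rw [← htw, hfv]
          rw [pvA_eqform_hit _ t "text" rest ht hin hg, pv_insT, ih rest hrl]
          rw [pv_scan_eqform_miss (t := t) (flag := "--html") vh (pvBeforeDD rest) (by decide) (by rw [htwF]; decide) hmem,
              pv_scan_eqform_miss (t := t) (flag := "--json") vj (pvBeforeDD rest) (by decide) (by rw [htwF]; decide) hmem,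
              pv_scan_eqform_miss (t := t) (flag := "--md") vm (pvBeforeDD rest) (by decide) (by rw [htwF]; decide) hmem,
              pv_scan_eqform_miss (t := t) (flag := "--sarif") vs (pvBeforeDD rest) (by decide) (by rw [htwF]; decide) hmem,
              pv_scan_eqform_hit (t := t) (flag := "--text") vt (pvBeforeDD rest) (by decide) htwF hmem]
        have hg : pvFlagToField.get? (pvFirst t) = none := by
          rw [pv_get5, beq_eq_false_iff_ne.mpr hq1, beq_eq_false_iff_ne.mpr hq2, beq_eq_false_iff_ne.mpr hq3, beq_eq_false_iff_ne.mpr hq4, beq_eq_false_iff_ne.mpr hq5]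
          rfl
        rw [pvA_eqform_miss _ t rest ht hin hg, ih rest hrl]
        rw [pv_scan_eqform_miss (t := t) (flag := "--html") vh (pvBeforeDD rest) (by decide) (fun hc => hq1 (pv_str_eq_of_toList (htw.trans hc)).symm) hmem,
            pv_scan_eqform_miss (t := t) (flag := "--json") vj (pvBeforeDD rest) (by decide) (fun hc => hq2 (pv_str_eq_of_toList (htw.trans hc)).symm) hmem,
            pv_scan_eqform_miss (t := t) (flag := "--md") vm (pvBeforeDD rest) (by decide) (fun hc => hq3 (pv_str_eq_of_toList (htw.trans hc)).symm) hmem,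
            pv_scan_eqform_miss (t := t) (flag := "--sarif") vs (pvBeforeDD rest) (by decide) (fun hc => hq4 (pv_str_eq_of_toList (htw.trans hc)).symm) hmem,
            pv_scan_eqform_miss (t := t) (flag := "--text") vt (pvBeforeDD rest) (by decide) (fun hc => hq5 (pv_str_eq_of_toList (htw.trans hc)).symm) hmem]
      | false =>
        have hnin : '=' ∉ t.toList := pv_not_mem_of_not_isIn hin
        by_cases hq1 : "--html" = t
        · -- html
          have hteq : t = "--html" := hq1.symm
          subst hteq
          have hg : pvFlagToField.get? "--html" = some "html" := rfl
          cases rest with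
          | nil => rfl
          | cons n rest' =>
            have hrl' : rest'.length ≤ N := by have h := hrl; simp at h; omega
            cases hdash : PySem.Str.startswith n "-" with
            | true =>
              rw [pvA_flag_dash _ "--html" "html" n rest' ht hin hg hdash, pv_insH, ih (n :: rest') hrl]
              by_cases hn : n = "--"
              · subst hn; rw [pv_bdd_dd]; rfl
              rw [pv_bdd_cons n rest' (beq_eq_false_iff_ne.mpr hn)]
              rw [pv_scan_selfhit_cons_default "--html" vh n _ hdash,
                  pv_scan_plain_miss (t := "--html") (flag := "--json") vj _ (by decide) (by decide) (by decide),
                  pv_scan_plain_miss (t := "--html") (flag := "--md") vm _ (by decide) (by decide) (by decide),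
                  pv_scan_plain_miss (t := "--html") (flag := "--sarif") vs _ (by decide) (by decide) (by decide),
                  pv_scan_plain_miss (t := "--html") (flag := "--text") vt _ (by decide) (by decide) (by decide)]
            | false =>
              have hn : n ≠ "--" := by intro he; rw [he] at hdash; exact absurd hdash (by decide)
              rw [pvA_flag_val _ "--html" "html" n rest' ht hin hg hdash, pv_insH, ih rest' hrl']
              rw [pv_bdd_cons n rest' (beq_eq_false_iff_ne.mpr hn)]
              rw [pv_scan_selfhit_cons_explicit "--html" vh n _ hdash,
                  pv_scan_dash_miss (t := n) (flag := "--html") (some "explicit") _ (by decide) hdash,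
                  pv_scan_plain_miss (t := "--html") (flag := "--json") vj _ (by decide) (by decide) (by decide),
                  pv_scan_dash_miss (t := n) (flag := "--json") vj _ (by decide) hdash,
                  pv_scan_plain_miss (t := "--html") (flag := "--md") vm _ (by decide) (by decide) (by decide),
                  pv_scan_dash_miss (t := n) (flag := "--md") vm _ (by decide) hdash,
                  pv_scan_plain_miss (t := "--html") (flag := "--sarif") vs _ (by decide) (by decide) (by decide),
                  pv_scan_dash_miss (t := n) (flag := "--sarif") vs _ (by decide) hdash,
                  pv_scan_plain_miss (t := "--html") (flag := "--text") vt _ (by decide) (by decide) (by decide),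
                  pv_scan_dash_miss (t := n) (flag := "--text") vt _ (by decide) hdash]
        by_cases hq2 : "--json" = t
        · -- json
          have hteq : t = "--json" := hq2.symm
          subst hteq
          have hg : pvFlagToField.get? "--json" = some "json" := rfl
          cases rest with
          | nil => rfl
          | cons n rest' =>
            have hrl' : rest'.length ≤ N := by have h := hrl; simp at h; omega
            cases hdash : PySem.Str.startswith n "-" with
            | true =>
              rw [pvA_flag_dash _ "--json" "json" n rest' ht hin hg hdash, pv_insJ, ih (n :: rest') hrl]
              by_cases hn : n = "--"
              · subst hn; rw [pv_bdd_dd]; rfl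
              rw [pv_bdd_cons n rest' (beq_eq_false_iff_ne.mpr hn)]
              rw [pv_scan_plain_miss (t := "--json") (flag := "--html") vh _ (by decide) (by decide) (by decide),
                  pv_scan_selfhit_cons_default "--json" vj n _ hdash,
                  pv_scan_plain_miss (t := "--json") (flag := "--md") vm _ (by decide) (by decide) (by decide),
                  pv_scan_plain_miss (t := "--json") (flag := "--sarif") vs _ (by decide) (by decide) (by decide),
                  pv_scan_plain_miss (t := "--json") (flag := "--text") vt _ (by decide) (by decide) (by decide)]
            | false =>
              have hn : n ≠ "--" := by intro he; rw [he] at hdash; exact absurd hdash (by decide)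
              rw [pvA_flag_val _ "--json" "json" n rest' ht hin hg hdash, pv_insJ, ih rest' hrl']
              rw [pv_bdd_cons n rest' (beq_eq_false_iff_ne.mpr hn)]
              rw [pv_scan_plain_miss (t := "--json") (flag := "--html") vh _ (by decide) (by decide) (by decide),
                  pv_scan_dash_miss (t := n) (flag := "--html") vh _ (by decide) hdash,
                  pv_scan_selfhit_cons_explicit "--json" vj n _ hdash,
                  pv_scan_dash_miss (t := n) (flag := "--json") (some "explicit") _ (by decide) hdash,
                  pv_scan_plain_miss (t := "--json") (flag := "--md") vm _ (by decide) (by decide) (by decide),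
                  pv_scan_dash_miss (t := n) (flag := "--md") vm _ (by decide) hdash,
                  pv_scan_plain_miss (t := "--json") (flag := "--sarif") vs _ (by decide) (by decide) (by decide),
                  pv_scan_dash_miss (t := n) (flag := "--sarif") vs _ (by decide) hdash,
                  pv_scan_plain_miss (t := "--json") (flag := "--text") vt _ (by decide) (by decide) (by decide),
                  pv_scan_dash_miss (t := n) (flag := "--text") vt _ (by decide) hdash]
        by_cases hq3 : "--md" = t
        · -- md
          have hteq : t = "--md" := hq3.symm
          subst hteq
          have hg : pvFlagToField.get? "--md" = some "md" := rfl
          cases rest with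
          | nil => rfl
          | cons n rest' =>
            have hrl' : rest'.length ≤ N := by have h := hrl; simp at h; omega
            cases hdash : PySem.Str.startswith n "-" with
            | true =>
              rw [pvA_flag_dash _ "--md" "md" n rest' ht hin hg hdash, pv_insM, ih (n :: rest') hrl]
              by_cases hn : n = "--"
              · subst hn; rw [pv_bdd_dd]; rfl
              rw [pv_bdd_cons n rest' (beq_eq_false_iff_ne.mpr hn)]
              rw [pv_scan_plain_miss (t := "--md") (flag := "--html") vh _ (by decide) (by decide) (by decide),
                  pv_scan_plain_miss (t := "--md") (flag := "--json") vj _ (by decide) (by decide) (by decide),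
                  pv_scan_selfhit_cons_default "--md" vm n _ hdash,
                  pv_scan_plain_miss (t := "--md") (flag := "--sarif") vs _ (by decide) (by decide) (by decide),
                  pv_scan_plain_miss (t := "--md") (flag := "--text") vt _ (by decide) (by decide) (by decide)]
            | false =>
              have hn : n ≠ "--" := by intro he; rw [he] at hdash; exact absurd hdash (by decide)
              rw [pvA_flag_val _ "--md" "md" n rest' ht hin hg hdash, pv_insM, ih rest' hrl']
              rw [pv_bdd_cons n rest' (beq_eq_false_iff_ne.mpr hn)]
              rw [pv_scan_plain_miss (t := "--md") (flag := "--html") vh _ (by decide) (by decide) (by decide),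
                  pv_scan_dash_miss (t := n) (flag := "--html") vh _ (by decide) hdash,
                  pv_scan_plain_miss (t := "--md") (flag := "--json") vj _ (by decide) (by decide) (by decide),
                  pv_scan_dash_miss (t := n) (flag := "--json") vj _ (by decide) hdash,
                  pv_scan_selfhit_cons_explicit "--md" vm n _ hdash,
                  pv_scan_dash_miss (t := n) (flag := "--md") (some "explicit") _ (by decide) hdash,
                  pv_scan_plain_miss (t := "--md") (flag := "--sarif") vs _ (by decide) (by decide) (by decide),
                  pv_scan_dash_miss (t := n) (flag := "--sarif") vs _ (by decide) hdash,
                  pv_scan_plain_miss (t := "--md") (flag := "--text") vt _ (by decide) (by decide) (by decide),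
                  pv_scan_dash_miss (t := n) (flag := "--text") vt _ (by decide) hdash]
        by_cases hq4 : "--sarif" = t
        · -- sarif
          have hteq : t = "--sarif" := hq4.symm
          subst hteq
          have hg : pvFlagToField.get? "--sarif" = some "sarif" := rfl
          cases rest with
          | nil => rfl
          | cons n rest' =>
            have hrl' : rest'.length ≤ N := by have h := hrl; simp at h; omega
            cases hdash : PySem.Str.startswith n "-" with
            | true =>
              rw [pvA_flag_dash _ "--sarif" "sarif" n rest' ht hin hg hdash, pv_insS, ih (n :: rest') hrl]
              by_cases hn : n = "--"
              · subst hn; rw [pv_bdd_dd]; rfl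
              rw [pv_bdd_cons n rest' (beq_eq_false_iff_ne.mpr hn)]
              rw [pv_scan_plain_miss (t := "--sarif") (flag := "--html") vh _ (by decide) (by decide) (by decide),
                  pv_scan_plain_miss (t := "--sarif") (flag := "--json") vj _ (by decide) (by decide) (by decide),
                  pv_scan_plain_miss (t := "--sarif") (flag := "--md") vm _ (by decide) (by decide) (by decide),
                  pv_scan_selfhit_cons_default "--sarif" vs n _ hdash,
                  pv_scan_plain_miss (t := "--sarif") (flag := "--text") vt _ (by decide) (by decide) (by decide)]
            | false =>
              have hn : n ≠ "--" := by intro he; rw [he] at hdash; exact absurd hdash (by decide)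
              rw [pvA_flag_val _ "--sarif" "sarif" n rest' ht hin hg hdash, pv_insS, ih rest' hrl']
              rw [pv_bdd_cons n rest' (beq_eq_false_iff_ne.mpr hn)]
              rw [pv_scan_plain_miss (t := "--sarif") (flag := "--html") vh _ (by decide) (by decide) (by decide),
                  pv_scan_dash_miss (t := n) (flag := "--html") vh _ (by decide) hdash,
                  pv_scan_plain_miss (t := "--sarif") (flag := "--json") vj _ (by decide) (by decide) (by decide),
                  pv_scan_dash_miss (t := n) (flag := "--json") vj _ (by decide) hdash,
                  pv_scan_plain_miss (t := "--sarif") (flag := "--md") vm _ (by decide) (by decide) (by decide),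
                  pv_scan_dash_miss (t := n) (flag := "--md") vm _ (by decide) hdash,
                  pv_scan_selfhit_cons_explicit "--sarif" vs n _ hdash,
                  pv_scan_dash_miss (t := n) (flag := "--sarif") (some "explicit") _ (by decide) hdash,
                  pv_scan_plain_miss (t := "--sarif") (flag := "--text") vt _ (by decide) (by decide) (by decide),
                  pv_scan_dash_miss (t := n) (flag := "--text") vt _ (by decide) hdash]
        by_cases hq5 : "--text" = t
        · -- text
          have hteq : t = "--text" := hq5.symm
          subst hteq
          have hg : pvFlagToField.get? "--text" = some "text" := rfl
          cases rest with
          | nil => rfl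
          | cons n rest' =>
            have hrl' : rest'.length ≤ N := by have h := hrl; simp at h; omega
            cases hdash : PySem.Str.startswith n "-" with
            | true =>
              rw [pvA_flag_dash _ "--text" "text" n rest' ht hin hg hdash, pv_insT, ih (n :: rest') hrl]
              by_cases hn : n = "--"
              · subst hn; rw [pv_bdd_dd]; rfl
              rw [pv_bdd_cons n rest' (beq_eq_false_iff_ne.mpr hn)]
              rw [pv_scan_plain_miss (t := "--text") (flag := "--html") vh _ (by decide) (by decide) (by decide),
                  pv_scan_plain_miss (t := "--text") (flag := "--json") vj _ (by decide) (by decide) (by decide),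
                  pv_scan_plain_miss (t := "--text") (flag := "--md") vm _ (by decide) (by decide) (by decide),
                  pv_scan_plain_miss (t := "--text") (flag := "--sarif") vs _ (by decide) (by decide) (by decide),
                  pv_scan_selfhit_cons_default "--text" vt n _ hdash]
            | false =>
              have hn : n ≠ "--" := by intro he; rw [he] at hdash; exact absurd hdash (by decide)
              rw [pvA_flag_val _ "--text" "text" n rest' ht hin hg hdash, pv_insT, ih rest' hrl']
              rw [pv_bdd_cons n rest' (beq_eq_false_iff_ne.mpr hn)]
              rw [pv_scan_plain_miss (t := "--text") (flag := "--html") vh _ (by decide) (by decide) (by decide),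
                  pv_scan_dash_miss (t := n) (flag := "--html") vh _ (by decide) hdash,
                  pv_scan_plain_miss (t := "--text") (flag := "--json") vj _ (by decide) (by decide) (by decide),
                  pv_scan_dash_miss (t := n) (flag := "--json") vj _ (by decide) hdash,
                  pv_scan_plain_miss (t := "--text") (flag := "--md") vm _ (by decide) (by decide) (by decide),
                  pv_scan_dash_miss (t := n) (flag := "--md") vm _ (by decide) hdash,
                  pv_scan_plain_miss (t := "--text") (flag := "--sarif") vs _ (by decide) (by decide) (by decide),
                  pv_scan_dash_miss (t := n) (flag := "--sarif") vs _ (by decide) hdash,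
                  pv_scan_selfhit_cons_explicit "--text" vt n _ hdash,
                  pv_scan_dash_miss (t := n) (flag := "--text") (some "explicit") _ (by decide) hdash]
        have hg : pvFlagToField.get? t = none := by
          rw [pv_get5, beq_eq_false_iff_ne.mpr hq1, beq_eq_false_iff_ne.mpr hq2, beq_eq_false_iff_ne.mpr hq3, beq_eq_false_iff_ne.mpr hq4, beq_eq_false_iff_ne.mpr hq5]
          rfl
        rw [pvA_plain_miss _ t rest ht hin hg, ih rest hrl]
        rw [pv_scan_plain_miss (t := t) (flag := "--html") vh _ (by decide) hnin (Ne.symm hq1),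
            pv_scan_plain_miss (t := t) (flag := "--json") vj _ (by decide) hnin (Ne.symm hq2),
            pv_scan_plain_miss (t := t) (flag := "--md") vm _ (by decide) hnin (Ne.symm hq3),
            pv_scan_plain_miss (t := t) (flag := "--sarif") vs _ (by decide) hnin (Ne.symm hq4),
            pv_scan_plain_miss (t := t) (flag := "--text") vt _ (by decide) hnin (Ne.symm hq5)]

-- ===== VERDICT (by name: the statement is the Claim_ definition above) =====
theorem report_path_origins_py_spec : Claim_equal_report_path_origins_py := by
  intro argv _
  show report_path_origins_py argv = report_path_origins_py_alt argv
  rw [show report_path_origins_py argv = (pvLoopA (pvD5 none none none none none) argv).items from rfl]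
  rw [pv_main argv.length argv le_rfl]
  rfl
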